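-- pv_equiv track=rewrite | github.com/hildenost/advent-of-code | 2019/24/bugs.py | bitmask
-- ===== SOURCE A (Python) =====
-- def bitmask(k):
--     neighbours = [
--         k - 5,  # UP
--         k - 1 if k % 5 else -1,  # LEFT except when left edge
--         k + 1 if k % 5 != 4 else -1,  # RIGHT except when right edge
--         k + 5,  # DOWN
--     ]
--     bitstring = "".join("1" if c in neighbours else "0" for c in range(25))
--     return int(bitstring, 2)
-- ===== SOURCE B (Python) =====
-- def bitmask(k):
--     mask = 0
--     cands = [k - 5]
--     if k % 5:
--         cands.append(k - 1)
--     if k % 5 != 4: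
--         cands.append(k + 1)
--     cands.append(k + 5)
--     for pos in cands:
--         if 0 <= pos < 25:
--             mask |= 1 << (24 - pos)
--     return mask
-- ===== Notes on version B (the rewrite author's own statement) =====
-- stated objective: simpler
-- what changed: Instead of scanning every grid cell, testing membership in a neighbour list and parsing an intermediate bit string, B iterates over only the in-range neighbour positions and ORs the corresponding single bit directly into an integer mask.
import Mathlib
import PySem

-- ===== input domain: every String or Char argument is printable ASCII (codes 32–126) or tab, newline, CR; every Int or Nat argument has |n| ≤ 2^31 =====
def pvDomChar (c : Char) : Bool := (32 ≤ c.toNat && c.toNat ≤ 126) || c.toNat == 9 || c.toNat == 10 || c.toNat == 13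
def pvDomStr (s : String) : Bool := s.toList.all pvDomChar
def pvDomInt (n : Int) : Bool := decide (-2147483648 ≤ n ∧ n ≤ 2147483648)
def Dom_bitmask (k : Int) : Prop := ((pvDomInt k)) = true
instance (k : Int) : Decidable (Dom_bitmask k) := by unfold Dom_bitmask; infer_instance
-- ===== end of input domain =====

-- B replaces A's scan of all 25 cells (with a membership test and an intermediate bit
-- string parsed by int(..., 2)) by ORing 1 <<< (24 - pos) for the at-most-4 in-range
-- neighbour positions directly into an integer mask (objective: simpler).

-- ===== PORT A =====
-- int(s, 2): hand-ported fold; exact on strings consisting of '0'/'1' digits,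
-- which is the only shape A ever feeds it.
def intBase2 (s : String) : Int :=
  s.toList.foldl (fun acc c => acc * 2 + (if c = '1' then 1 else 0)) 0

def bitmask (k : Int) : Int :=
  let neighbours : List Int :=
    [ k - 5,
      if PySem.Int.mod k 5 ≠ 0 then k - 1 else -1,
      if PySem.Int.mod k 5 ≠ 4 then k + 1 else -1,
      k + 5 ]
  let bitstring : String :=
    PySem.Str.join "" ((PySem.List.pyRange 0 25 1).map
      (fun c => if neighbours.contains c then "1" else "0"))
  intBase2 bitstring

-- ===== PORT B =====
def bitmask_alt (k : Int) : Int :=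
  let cands : List Int :=
    [k - 5]
      ++ (if PySem.Int.mod k 5 ≠ 0 then [k - 1] else [])
      ++ (if PySem.Int.mod k 5 ≠ 4 then [k + 1] else [])
      ++ [k + 5]
  cands.foldl (fun (mask : Int) (pos : Int) =>
    if 0 ≤ pos ∧ pos < 25 then Int.lor mask ((1 : Int) <<< (24 - pos).toNat) else mask) 0

-- ===== PRECONDITION & SPEC =====
def Spec_bitmask (k : Int) (out : Int) : Prop := out = bitmask_alt k
instance (k : Int) (out : Int) : Decidable (Spec_bitmask k out) := by unfold Spec_bitmask; infer_instance

-- ===== CLAIM (what is proved, stated in full; the proofs are below) =====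
def Claim_equal_bitmask : Prop := ∀ (k : Int), Dom_bitmask k → Spec_bitmask k (bitmask k)

-- ===== LEMMAS AND PROOFS =====

-- Away from the board (k ≤ -6 or 30 ≤ k), no candidate lies in [0, 25), so A's
-- bitstring is all zeros and B's mask stays 0.
lemma bitmask_out (k : Int) (h : k ≤ -6 ∨ 30 ≤ k) : bitmask k = 0 := by
  unfold bitmask
  have hr : PySem.List.pyRange 0 25 1 =
      ([0,1,2,3,4,5,6,7,8,9,10,11,12,13,14,15,16,17,18,19,20,21,22,23,24] : List Int) := by
    decide
  have hc : ∀ c : Int, 0 ≤ c → c < 25 →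
      (([ k - 5,
          if PySem.Int.mod k 5 ≠ 0 then k - 1 else -1,
          if PySem.Int.mod k 5 ≠ 4 then k + 1 else -1,
          k + 5 ] : List Int).contains c) = false := by
    intro c h1 h2
    simp only [List.contains_cons, List.contains_nil, Bool.or_eq_false_iff,
      beq_eq_false_iff_ne, ne_eq]
    split_ifs <;> refine ⟨by omega, by omega, by omega, by omega, trivial⟩
  have hmap :
      (([0,1,2,3,4,5,6,7,8,9,10,11,12,13,14,15,16,17,18,19,20,21,22,23,24] : List Int).map
        (fun c => if ([ k - 5,
            if PySem.Int.mod k 5 ≠ 0 then k - 1 else -1,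
            if PySem.Int.mod k 5 ≠ 4 then k + 1 else -1,
            k + 5 ] : List Int).contains c then "1" else "0"))
      = ([0,1,2,3,4,5,6,7,8,9,10,11,12,13,14,15,16,17,18,19,20,21,22,23,24] : List Int).map
        (fun _ => "0") := by
    apply List.map_congr_left
    intro c hcm
    have hb : 0 ≤ c ∧ c < 25 := by
      simp only [List.mem_cons, List.not_mem_nil, or_false] at hcm
      omega
    rw [hc c hb.1 hb.2]
    simp
  simp only [hr, hmap]
  decide

lemma bitmask_alt_out (k : Int) (h : k ≤ -6 ∨ 30 ≤ k) : bitmask_alt k = 0 := by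
  unfold bitmask_alt
  split_ifs <;>
    simp only [List.append_nil, List.nil_append, List.cons_append, List.foldl_cons,
      List.foldl_nil] <;>
    (repeat rw [if_neg (by omega)])

-- ===== VERDICT (by name: the statement is the Claim_ definition above) =====
theorem bitmask_spec : Claim_equal_bitmask := by
  intro k _
  unfold Spec_bitmask
  by_cases h : -5 ≤ k ∧ k ≤ 29
  · obtain ⟨h1, h2⟩ := h
    interval_cases k <;> decide
  · rw [bitmask_out k (by omega), bitmask_alt_out k (by omega)]
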